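-- pv_equiv track=rewrite | github.com/uit-hdl/chatbot-for-mental-health | src/utils/console_chat_display.py | wrap_message
-- ===== SOURCE A (Python) =====
-- import textwrap
--
-- def wrap_message(message: str, line_length=80):
--     """Wraps the message so that line lengths does not exceed a given maximum."""
--     paragraphs = message.split("\n\n")
--     wrapped_paragraphs = []
--
--     for paragraph in paragraphs:
--         lines = paragraph.split("\n")
--         wrapped_paragraph = []
--
--         for line in lines:
--             # Split the line by line breaks and wrap each part separately
--             parts = line.split("\n")
--             wrapped_parts = [textwrap.wrap(part, line_length) for part in parts]
--
--             # Join the wrapped parts using line breaks and append to the paragraph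
--             wrapped_line = "\n".join(
--                 "\n".join(wrapped_part) for wrapped_part in wrapped_parts
--             )
--             wrapped_paragraph.append(wrapped_line)
--
--         wrapped_paragraph = "\n".join(wrapped_paragraph)
--         wrapped_paragraphs.append(wrapped_paragraph)
--
--     wrapped_message = "\n\n".join(wrapped_paragraphs)
--
--     return wrapped_message
-- ===== SOURCE B (Python) =====
-- import textwrap
--
--
-- def wrap_message(message: str, line_length=80):
--     """Wraps the message so that line lengths does not exceed a given maximum."""
--     return "\n".join(
--         "\n".join(textwrap.wrap(line, line_length)) for line in message.split("\n")
--     )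
-- ===== Notes on version B (the rewrite author's own statement) =====
-- stated objective: simpler
-- what changed: B replaces A's three nested loops (paragraph split on double newlines, per-paragraph line split, and the redundant inner split of each line) by a single split of the whole message on single newlines with one wrap-and-join pass, the empty segments produced by consecutive newlines rebuilding every paragraph separator (proved via a greedy-regrouping lemma relating the two splits); B's hand-port of textwrap.wrap is also independently structured (fused whitespace pass, find?-based break scanner, gap-free splitter, count-based greedy filler) and proved equal to A's model.
import Mathlib
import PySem

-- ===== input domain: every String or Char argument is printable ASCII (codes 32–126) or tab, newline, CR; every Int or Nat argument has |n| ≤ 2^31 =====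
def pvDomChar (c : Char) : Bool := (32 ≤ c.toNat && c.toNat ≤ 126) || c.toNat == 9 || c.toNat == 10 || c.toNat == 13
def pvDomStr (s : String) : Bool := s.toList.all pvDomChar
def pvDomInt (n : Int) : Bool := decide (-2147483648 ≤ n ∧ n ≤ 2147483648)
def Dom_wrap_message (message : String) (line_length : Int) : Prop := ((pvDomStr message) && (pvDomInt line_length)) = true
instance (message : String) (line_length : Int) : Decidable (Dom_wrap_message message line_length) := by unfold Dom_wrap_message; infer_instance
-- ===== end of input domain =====

-- B flattens A's nested paragraph/line/parts loops into a single split on "\n" with one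
-- wrap-and-join pass, and its hand port of textwrap.wrap is an independently structured
-- model (fused whitespace pass, find?-based break scanner, gap-free splitter, count-based
-- greedy filler) proved equal to A's model (objective: simpler).


-- ===== PORT A =====
-- A-side hand port of Python's textwrap.wrap(text, width), default options (PySem has no
-- textwrap): _munge_whitespace = expandtabs(8) + whitespace→' ' as two passes, _split =
-- the wordsep_re regex as a recursive leftmost-match scanner, _wrap_chunks = the greedy
-- loop with an accumulator of finished lines. Exact on the printable-ASCII+tab/CR domain.

def twIsWs (c : Char) : Bool :=
  c == ' ' || c == '\t' || c == '\n' || c.toNat == 11 || c.toNat == 12 || c.toNat == 13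

-- \w (ASCII)
def twIsWord (c : Char) : Bool :=
  ('a' ≤ c && c ≤ 'z') || ('A' ≤ c && c ≤ 'Z') || ('0' ≤ c && c ≤ '9') || c == '_'

-- [^\d\W] (ASCII): letters and underscore
def twIsLetter (c : Char) : Bool :=
  ('a' ≤ c && c ≤ 'z') || ('A' ≤ c && c ≤ 'Z') || c == '_'

-- word_punct = [\w!"'&.,?]
def twIsWp (c : Char) : Bool :=
  twIsWord c || c == '!' || c == '"' || c == '\'' || c == '&' || c == '.' || c == ',' || c == '?'

-- str.expandtabs(8): '\n'/'\r' reset the column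
def twExpandTabs : List Char → Nat → List Char
  | [], _ => []
  | c :: r, col =>
    if c = '\t' then
      let k := 8 - col % 8
      List.replicate k ' ' ++ twExpandTabs r (col + k)
    else if c = '\n' ∨ c = '\r' then c :: twExpandTabs r 0
    else c :: twExpandTabs r (col + 1)

-- _munge_whitespace
def twMunge (t : List Char) : List Char :=
  (twExpandTabs t 0).map (fun c => if twIsWs c then ' ' else c)

-- end of the maximal run of characters satisfying p, starting at index i
def twRunEnd (t : List Char) (p : Char → Bool) (i : Nat) : Nat :=
  if h : i < t.length then
    if p (t.getD i ' ') then twRunEnd t p (i + 1) else i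
  else i
termination_by t.length - i

-- the word alternative of wordsep_re, trying positions b = i+1, i+2, … (lazy \S+?);
-- inner alternation order: hyphenated word, end of word, em-dash lookahead
def twAlt3 (t : List Char) (b : Nat) : Option Nat :=
  if hb : b < t.length then
    let n := t.length
    let get := fun k => t.getD k ' '
    if get b == '-' &&
        ((decide (2 ≤ b) && twIsLetter (get (b - 2)) && twIsLetter (get (b - 1))) ||
         (decide (3 ≤ b) && twIsLetter (get (b - 3)) && get (b - 2) == '-' && twIsLetter (get (b - 1)))) &&
        (decide (b + 1 < n) && twIsLetter (get (b + 1)) &&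
          ((decide (b + 3 < n) && get (b + 2) == '-' && twIsLetter (get (b + 3))) ||
           (decide (b + 2 < n) && twIsLetter (get (b + 2))))) then
      some (b + 1)
    else if twIsWs (get b) then some b
    else if twIsWp (get (b - 1)) && decide (b + 1 < n) && get b == '-' && get (b + 1) == '-' &&
        (let j := twRunEnd t (· == '-') b; decide (j < n) && twIsWord (get j)) then
      some b
    else twAlt3 t (b + 1)
  else some b  -- b = length: end-of-word alternative matches at end of string
termination_by t.length - b

-- leftmost-alternative match of wordsep_re at position i (i < length); none = no match here
def twMatchAt (t : List Char) (i : Nat) : Option Nat :=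
  let n := t.length
  let get := fun k => t.getD k ' '
  if twIsWs (get i) then some (twRunEnd t twIsWs i)
  else if decide (0 < i) && !twIsWs (get (i - 1)) && get i == '-' then
    let j := twRunEnd t (· == '-') i
    if decide (i + 2 ≤ j) && decide (j < n) && twIsWord (get j) then some j
    else twAlt3 t (i + 1)
  else twAlt3 t (i + 1)

def twFindMatch (t : List Char) (i : Nat) : Option (Nat × Nat) :=
  if h : i < t.length then
    match twMatchAt t i with
    | some e => some (i, e)
    | none => twFindMatch t (i + 1)
  else none
termination_by t.length - i

-- wordsep_re.split, keeping the nonempty gaps and matches in order (fuel ≥ length+1 suffices: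
-- every match consumes at least one character)
def twSplitChunks (t : List Char) (pos : Nat) (fuel : Nat) : List (List Char) :=
  match fuel with
  | 0 => if pos < t.length then [t.drop pos] else []
  | fuel + 1 =>
    if pos < t.length then
      match twFindMatch t pos with
      | none => [t.drop pos]
      | some (i, e) =>
        (if pos < i then [(t.drop pos).take (i - pos)] else []) ++
          (t.drop i).take (e - i) :: twSplitChunks t e fuel
    else []

-- str.rfind('-') on a chunk prefix
def twRfindDash (l : List Char) : Int :=
  match l.reverse.findIdx? (· == '-') with
  | some k => (l.length : Int) - 1 - k
  | none => -1

-- _handle_long_word: how many characters of the head chunk go onto the current line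
def twHandleLongWord (chunk : List Char) (curLen : Int) (width : Int) : Nat :=
  let spaceLeft : Int := if width < 1 then 1 else width - curLen
  if (chunk.length : Int) > spaceLeft then
    let hyphen := twRfindDash (chunk.take spaceLeft.toNat)
    if hyphen > 0 && (chunk.take hyphen.toNat).any (· != '-') then (hyphen + 1).toNat
    else spaceLeft.toNat
  else spaceLeft.toNat

-- the inner greedy while-loop of _wrap_chunks
def twGreedy (chunks : List (List Char)) (curLine : List (List Char)) (curLen : Int)
    (width : Int) : List (List Char) × Int × List (List Char) :=
  match chunks with
  | [] => (curLine, curLen, [])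
  | c :: rest =>
    if curLen + (c.length : Int) ≤ width then
      twGreedy rest (curLine ++ [c]) (curLen + (c.length : Int)) width
    else (curLine, curLen, c :: rest)

-- the outer while-loop of _wrap_chunks; acc = lines built so far
def twWrapChunks (chunks : List (List Char)) (width : Int) (fuel : Nat)
    (acc : List (List Char)) : List (List Char) :=
  match fuel with
  | 0 => acc
  | fuel + 1 =>
    match chunks with
    | [] => acc
    | c :: rest =>
      -- drop_whitespace at start of a line that is not the first
      let chunks1 := if (PySem.Chars.strip c).isEmpty && !acc.isEmpty then rest else c :: rest
      let g := twGreedy chunks1 [] 0 width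
      let curLine := g.1
      let curLen := g.2.1
      let chunks2 := g.2.2
      let step :=
        match chunks2 with
        | [] => (curLine, chunks2)
        | h :: tl =>
          if (h.length : Int) > width then
            let e := twHandleLongWord h curLen width
            (curLine ++ [h.take e], h.drop e :: tl)
          else (curLine, chunks2)
      let curLine2 := step.1
      let chunks3 := step.2
      -- drop_whitespace at end of line
      let curLine3 :=
        match curLine2.getLast? with
        | some last => if (PySem.Chars.strip last).isEmpty then curLine2.dropLast else curLine2
        | none => curLine2
      let acc' := if curLine3.isEmpty then acc else acc ++ [curLine3.flatten]
      twWrapChunks chunks3 width fuel acc'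

-- textwrap.wrap(part, width) (defaults), as a List Char → List (List Char) function;
-- for width ≤ 0 Python raises ValueError (excluded by Pre_ below)
def pyTextwrapWrap (part : List Char) (width : Int) : List (List Char) :=
  let t := twMunge part
  let chunks := twSplitChunks t 0 (t.length + 1)
  twWrapChunks chunks width (2 * t.length + chunks.length + 1) []

def wrap_message (message : String) (line_length : Int) : String :=
  let paragraphs := PySem.Chars.splitOn message.toList ['\n', '\n']
  let wrapped_paragraphs := paragraphs.foldl (fun acc paragraph =>
    let lines := PySem.Chars.splitOn paragraph ['\n']
    let wrapped_paragraph := lines.foldl (fun acc2 line =>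
      let parts := PySem.Chars.splitOn line ['\n']
      let wrapped_parts := parts.map (fun part => pyTextwrapWrap part line_length)
      let wrapped_line :=
        PySem.Chars.join ['\n'] (wrapped_parts.map (fun wp => PySem.Chars.join ['\n'] wp))
      acc2 ++ [wrapped_line]) []
    acc ++ [PySem.Chars.join ['\n'] wrapped_paragraph]) []
  String.ofList (PySem.Chars.join ['\n', '\n'] wrapped_paragraphs)

-- ===== PORT B =====
-- B's own, independently structured hand port of textwrap.wrap: a single fused
-- whitespace/tab pass, break positions found by List.find? over index ranges instead of
-- a recursive alternation scanner, a gap-free chunk splitter, and a greedy filler that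
-- counts how many chunks fit and builds the line list by cons instead of an accumulator.

def bAt (us : List Char) (n : Nat) : Char := us[n]?.getD ' '

def bBlank (ws : List Char) : Bool := (PySem.Chars.strip ws).isEmpty

def bIsWs (ch : Char) : Bool := ch.isWhitespace || ch.toNat == 11 || ch.toNat == 12
def bIsWord (ch : Char) : Bool := ch.isAlphanum || ch == '_'
def bIsLetter (ch : Char) : Bool := ch.isAlpha || ch == '_'
def bIsWp (ch : Char) : Bool := bIsWord ch || ['!', '"', '\'', '&', '.', ',', '?'].contains ch

-- fused _munge_whitespace: tab expansion and whitespace→' ' in one pass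
def bMunge : List Char → Nat → List Char
  | [], _ => []
  | ch :: more, column =>
    if ch = '\t' then
      let pad := 8 - column % 8
      List.replicate pad ' ' ++ bMunge more (column + pad)
    else if ch = '\n' ∨ ch = '\r' then ' ' :: bMunge more 0
    else (if bIsWs ch then ' ' else ch) :: bMunge more (column + 1)

-- first index ≥ start where p fails, else the text length
def bRunEnd (txt : List Char) (p : Char → Bool) (start : Nat) : Nat :=
  match (List.range' start (txt.length - start)).find? (fun n => !(p (bAt txt n))) with
  | some n => n
  | none => txt.length

-- the hyphenated-word break of wordsep_re holds just before position q
def bBreakHyph (txt : List Char) (q : Nat) : Bool :=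
  bAt txt q == '-' &&
    ((Nat.ble 2 q && bIsLetter (bAt txt (q - 2)) && bIsLetter (bAt txt (q - 1))) ||
     (Nat.ble 3 q && bIsLetter (bAt txt (q - 3)) && bAt txt (q - 2) == '-' &&
       bIsLetter (bAt txt (q - 1)))) &&
    (Nat.blt (q + 1) txt.length && bIsLetter (bAt txt (q + 1)) &&
      ((Nat.blt (q + 3) txt.length && bAt txt (q + 2) == '-' && bIsLetter (bAt txt (q + 3))) ||
       (Nat.blt (q + 2) txt.length && bIsLetter (bAt txt (q + 2)))))

-- the em-dash lookahead break of wordsep_re holds at position q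
def bBreakWp (txt : List Char) (q : Nat) : Bool :=
  bIsWp (bAt txt (q - 1)) && Nat.blt (q + 1) txt.length && bAt txt q == '-' &&
    bAt txt (q + 1) == '-' &&
    (let stop := bRunEnd txt (· == '-') q; Nat.blt stop txt.length && bIsWord (bAt txt stop))

def bBreak (txt : List Char) (q : Nat) : Bool :=
  bBreakHyph txt q || bIsWs (bAt txt q) || bBreakWp txt q

-- end of the lazy word \S+? started before position start: the first break position
def bWordEnd (txt : List Char) (start : Nat) : Nat :=
  match (List.range' start (txt.length - start)).find? (bBreak txt) with
  | some q => if bBreakHyph txt q then q + 1 else q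
  | none => txt.length

-- the em-dash alternative at chunk start, as an optional end
def bEmDash (txt : List Char) (pos : Nat) : Option Nat :=
  if Nat.blt 0 pos && !bIsWs (bAt txt (pos - 1)) && bAt txt pos == '-' then
    let stop := bRunEnd txt (· == '-') pos
    if Nat.ble (pos + 2) stop && Nat.blt stop txt.length && bIsWord (bAt txt stop) then some stop
    else none
  else none

-- end of the chunk starting at pos (pos < length)
def bChunkEnd (txt : List Char) (pos : Nat) : Nat :=
  if bIsWs (bAt txt pos) then bRunEnd txt bIsWs pos
  else (bEmDash txt pos).getD (bWordEnd txt (pos + 1))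

-- gap-free splitter: on munged text every position starts a nonempty chunk
def bChunksFrom (txt : List Char) (pos : Nat) : Nat → List (List Char)
  | 0 => []
  | gas + 1 =>
    if pos < txt.length then
      txt.extract pos (bChunkEnd txt pos) :: bChunksFrom txt (bChunkEnd txt pos) gas
    else []

-- how many leading chunks fit on the current line
def bFitCount (w : Int) (used : Int) : List (List Char) → Nat
  | [] => 0
  | word :: more =>
    if used + (word.length : Int) ≤ w then bFitCount w (used + (word.length : Int)) more + 1 else 0

def bLineLen (words : List (List Char)) : Int := ((words.map List.length).sum : Nat)

-- index of the last '-' in zs, else -1 (str.rfind('-'))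
def bLastDash (zs : List Char) : Int :=
  (List.range zs.length).foldl (fun best n => if bAt zs n = '-' then (n : Int) else best) (-1)

-- _handle_long_word: characters of the head chunk that go onto the current line
def bLongWord (word : List Char) (used w : Int) : Nat :=
  let room : Int := if w < 1 then 1 else w - used
  if room < (word.length : Int) then
    let dash := bLastDash (word.take room.toNat)
    if 0 < dash && !((word.take dash.toNat).all (· == '-')) then (dash + 1).toNat
    else room.toNat
  else room.toNat

-- _wrap_chunks as a cons-building recursion; emitted = a line was already produced
def bWrap (w : Int) : List (List Char) → Nat → Bool → List (List Char)
  | _, 0, _ => []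
  | [], _ + 1, _ => []
  | word :: more, gas + 1, emitted =>
    let pool := if bBlank word && emitted then more else word :: more
    let fit := bFitCount w 0 pool
    let taken := pool.take fit
    let withLong :=
      match pool.drop fit with
      | [] => (taken, ([] : List (List Char)))
      | big :: queue =>
        if w < (big.length : Int) then
          let cut := bLongWord big (bLineLen taken) w
          (taken ++ [big.take cut], big.drop cut :: queue)
        else (taken, big :: queue)
    let line :=
      match withLong.1.reverse with
      | tail :: front => if bBlank tail then front.reverse else withLong.1
      | [] => withLong.1
    if line.isEmpty then bWrap w withLong.2 gas emitted
    else line.flatten :: bWrap w withLong.2 gas true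

def bTextwrapWrap (part : List Char) (w : Int) : List (List Char) :=
  let txt := bMunge part 0
  let chunks := bChunksFrom txt 0 (txt.length + 1)
  bWrap w chunks (2 * txt.length + chunks.length + 1) false

def wrap_message_alt (message : String) (line_length : Int) : String :=
  String.ofList (PySem.Chars.join ['\n']
    ((PySem.Chars.splitOn message.toList ['\n']).map
      (fun line => PySem.Chars.join ['\n'] (bTextwrapWrap line line_length))))

-- ===== PRECONDITION & SPEC =====
-- textwrap.wrap raises ValueError for any non-positive width, and A calls it on every input
def Pre_wrap_message (message : String) (line_length : Int) : Prop := 0 < line_length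
instance (message : String) (line_length : Int) : Decidable (Pre_wrap_message message line_length) := by
  unfold Pre_wrap_message; infer_instance

def pvWitness_wrap_message : String × Int := ("hello world\n\nsecond paragraph", 10)

def Spec_wrap_message (message : String) (line_length : Int) (out : String) : Prop := out = wrap_message_alt message line_length
instance (message : String) (line_length : Int) (out : String) : Decidable (Spec_wrap_message message line_length out) := by unfold Spec_wrap_message; infer_instance

-- ===== CLAIM (what is proved, stated in full; the proofs are below) =====
def Claim_equal_wrap_message : Prop := ∀ (message : String) (line_length : Int), Dom_wrap_message message line_length → Pre_wrap_message message line_length → Spec_wrap_message message line_length (wrap_message message line_length)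

-- ===== LEMMAS AND PROOFS =====

-- ---- part 1: the two textwrap models agree ----

theorem bAt_eq (us : List Char) (n : Nat) : bAt us n = us.getD n ' ' := by
  simp [bAt, List.getD]

theorem ble_eq (a b : Nat) : Nat.ble a b = decide (a ≤ b) := by
  rw [Bool.eq_iff_iff]
  simp [Nat.ble_eq]

theorem blt_eq (a b : Nat) : Nat.blt a b = decide (a < b) := by
  rw [Bool.eq_iff_iff]
  simp [Nat.blt_eq]

theorem bIsWs_eq (c : Char) : bIsWs c = twIsWs c := by
  simp only [bIsWs, twIsWs, Char.isWhitespace, Char.toNat]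
  rw [Bool.eq_iff_iff]
  simp only [Bool.or_eq_true, decide_eq_true_eq, beq_iff_eq, Char.ext_iff, UInt32.ext_iff]
  simp only [show (' ').val.toNat = 32 from rfl, show ('\t').val.toNat = 9 from rfl,
    show ('\n').val.toNat = 10 from rfl, show ('\r').val.toNat = 13 from rfl]
  omega

theorem bIsWord_eq (c : Char) : bIsWord c = twIsWord c := by
  simp only [bIsWord, twIsWord, Char.isAlphanum, Char.isAlpha, Char.isUpper, Char.isLower,
    Char.isDigit]
  rw [Bool.eq_iff_iff]
  simp only [Bool.or_eq_true, Bool.and_eq_true, decide_eq_true_eq, beq_iff_eq,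
    Char.le_def, UInt32.le_iff_toNat_le, Char.ext_iff, UInt32.ext_iff]
  simp only [show ('a').val.toNat = 97 from rfl, show ('z').val.toNat = 122 from rfl,
    show ('A').val.toNat = 65 from rfl, show ('Z').val.toNat = 90 from rfl,
    show ('0').val.toNat = 48 from rfl, show ('9').val.toNat = 57 from rfl,
    show ('_').val.toNat = 95 from rfl]
  omega

theorem bIsLetter_eq (c : Char) : bIsLetter c = twIsLetter c := by
  simp only [bIsLetter, twIsLetter, Char.isAlpha, Char.isUpper, Char.isLower]
  rw [Bool.eq_iff_iff]
  simp only [Bool.or_eq_true, Bool.and_eq_true, decide_eq_true_eq, beq_iff_eq,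
    Char.le_def, UInt32.le_iff_toNat_le, Char.ext_iff, UInt32.ext_iff]
  simp only [show ('a').val.toNat = 97 from rfl, show ('z').val.toNat = 122 from rfl,
    show ('A').val.toNat = 65 from rfl, show ('Z').val.toNat = 90 from rfl,
    show ('_').val.toNat = 95 from rfl]
  omega

theorem bIsWp_eq (c : Char) : bIsWp c = twIsWp c := by
  simp only [bIsWp, twIsWp, bIsWord_eq, List.contains_eq_mem, List.mem_cons]
  rw [Bool.eq_iff_iff]
  simp only [Bool.or_eq_true, decide_eq_true_eq, beq_iff_eq, List.not_mem_nil, or_false]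
  tauto

theorem bMunge_eq (l : List Char) : ∀ col, bMunge l col = (twExpandTabs l col).map (fun c => if twIsWs c then ' ' else c) := by
  induction l with
  | nil => intro col; rfl
  | cons c r ih =>
    intro col
    by_cases ht : c = '\t'
    · simp only [bMunge, twExpandTabs, if_pos ht, List.map_append, List.map_replicate, ih]
      simp [twIsWs]
    · by_cases hnr : c = '\n' ∨ c = '\r'
      · simp only [bMunge, twExpandTabs, if_neg ht, if_pos hnr, List.map_cons, ih]
        rcases hnr with h | h <;> subst h <;> simp [twIsWs]
      · simp only [bMunge, twExpandTabs, if_neg ht, if_neg hnr, List.map_cons, ih, bIsWs_eq]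

theorem bRunEnd_eq (t : List Char) (p : Char → Bool) (i : Nat) (h : i ≤ t.length) :
    bRunEnd t p i = twRunEnd t p i := by
  revert h
  induction i using twRunEnd.induct (t := t) (p := p) with
  | case1 i hlt hp ih =>
    intro h
    have hr : t.length - i = (t.length - (i + 1)) + 1 := by omega
    rw [bRunEnd, hr, List.range'_succ, List.find?_cons,
      show (!(p (bAt t i))) = false from by simp only [bAt_eq, hp, Bool.not_true]]
    rw [twRunEnd, dif_pos hlt, if_pos hp, ← ih (by omega), bRunEnd]
  | case2 i hlt hp =>
    intro h
    have hr : t.length - i = (t.length - (i + 1)) + 1 := by omega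
    have hp' : p (t.getD i ' ') = false := by
      revert hp; cases p (t.getD i ' ') <;> simp
    rw [bRunEnd, hr, List.range'_succ, List.find?_cons,
      show (!(p (bAt t i))) = true from by simp only [bAt_eq, hp', Bool.not_false], twRunEnd,
      dif_pos hlt, if_neg hp]
  | case3 i hlt =>
    intro h
    have hi : i = t.length := by omega
    rw [bRunEnd, hi]
    simp only [Nat.sub_self, List.range'_zero, List.find?_nil]
    rw [twRunEnd]
    simp

theorem twAlt3_step (t : List Char) (b : Nat) (h : b < t.length) :
    twAlt3 t b = if bBreakHyph t b then some (b + 1)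
      else if bIsWs (bAt t b) then some b
      else if bBreakWp t b then some b
      else twAlt3 t (b + 1) := by
  rw [twAlt3, dif_pos h]
  simp only [bBreakHyph, bBreakWp, bAt_eq, ble_eq, blt_eq, bIsLetter_eq, bIsWp_eq, bIsWord_eq,
    bIsWs_eq, bRunEnd_eq t _ b (le_of_lt h)]

theorem twAlt3_end (t : List Char) (b : Nat) (h : ¬ b < t.length) : twAlt3 t b = some b := by
  rw [twAlt3, dif_neg h]

theorem bWordEnd_step (t : List Char) (b : Nat) (h : b < t.length) :
    bWordEnd t b = if bBreak t b then (if bBreakHyph t b then b + 1 else b) else bWordEnd t (b + 1) := by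
  have hr : t.length - b = (t.length - (b + 1)) + 1 := by omega
  rw [bWordEnd, hr, List.range'_succ, List.find?_cons]
  cases hb : bBreak t b with
  | true => rfl
  | false => rfl

theorem bWordEnd_end (t : List Char) (b : Nat) (h : ¬ b < t.length) : bWordEnd t b = t.length := by
  have : t.length - b = 0 := by omega
  rw [bWordEnd, this]
  simp

theorem bWordEnd_eq_aux (t : List Char) : ∀ d s, s ≤ t.length → t.length - s ≤ d →
    twAlt3 t s = some (bWordEnd t s) := by
  intro d
  induction d with
  | zero =>
    intro s h hd
    have hs : ¬ s < t.length := by omega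
    rw [twAlt3_end t s hs, bWordEnd_end t s hs]
    congr 1
    omega
  | succ d ih =>
    intro s h hd
    by_cases hs : s < t.length
    · rw [twAlt3_step t s hs, bWordEnd_step t s hs]
      cases h1 : bBreakHyph t s with
      | true =>
        have hbk : bBreak t s = true := by rw [bBreak, h1, Bool.true_or, Bool.true_or]
        rw [hbk]
        simp
      | false =>
        cases h2 : bIsWs (bAt t s) with
        | true =>
          have hbk : bBreak t s = true := by rw [bBreak, h1, h2]; rfl
          rw [hbk]
          simp
        | false =>
          cases h3 : bBreakWp t s with
          | true =>
            have hbk : bBreak t s = true := by rw [bBreak, h1, h2, h3]; rfl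
            rw [hbk]
            simp
          | false =>
            have hbk : bBreak t s = false := by rw [bBreak, h1, h2, h3]; rfl
            rw [hbk]
            simp only [Bool.false_eq_true, if_false]
            exact ih (s + 1) (by omega) (by omega)
    · rw [twAlt3_end t s hs, bWordEnd_end t s hs]
      congr 1
      omega

theorem bWordEnd_eq (t : List Char) (s : Nat) (h : s ≤ t.length) :
    twAlt3 t s = some (bWordEnd t s) :=
  bWordEnd_eq_aux t (t.length - s) s h (le_refl _)

theorem bChunkEnd_eq (t : List Char) (i : Nat) (h : i < t.length) :
    twMatchAt t i = some (bChunkEnd t i) := by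
  have hfun : bIsWs = twIsWs := funext bIsWs_eq
  rw [twMatchAt, bChunkEnd, bEmDash, hfun,
    bRunEnd_eq t (fun x => x == '-') i (le_of_lt h),
    bRunEnd_eq t twIsWs i (le_of_lt h),
    bWordEnd_eq t (i + 1) (by omega)]
  simp only [bAt_eq, ble_eq, blt_eq, bIsWord_eq]
  split
  · rfl
  · split
    · split
      · rfl
      · rfl
    · rfl

theorem bRunEnd_le (t : List Char) (p : Char → Bool) (i : Nat) (h : i ≤ t.length) :
    bRunEnd t p i ≤ t.length := by
  rw [bRunEnd]
  cases hf : (List.range' i (t.length - i)).find? (fun n => !(p (bAt t n))) with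
  | none => simp
  | some k =>
    have hm := List.mem_of_find?_eq_some hf
    rw [List.mem_range'_1] at hm
    dsimp only
    omega

theorem bRunEnd_gt (t : List Char) (p : Char → Bool) (i : Nat) (h : i < t.length)
    (hp : p (bAt t i) = true) : i < bRunEnd t p i := by
  have hr : t.length - i = (t.length - (i + 1)) + 1 := by omega
  rw [bRunEnd, hr, List.range'_succ, List.find?_cons]
  simp only [hp, Bool.not_true]
  cases hf : (List.range' (i + 1) (t.length - (i + 1))).find? (fun n => !(p (bAt t n))) with
  | none => exact h
  | some k =>
    have hm := List.mem_of_find?_eq_some hf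
    rw [List.mem_range'_1] at hm
    dsimp only
    omega

theorem bWordEnd_lb (t : List Char) (s : Nat) (h : s ≤ t.length) : s ≤ bWordEnd t s := by
  rw [bWordEnd]
  cases hf : (List.range' s (t.length - s)).find? (bBreak t) with
  | none => exact h
  | some b =>
    have hm := List.mem_of_find?_eq_some hf
    rw [List.mem_range'_1] at hm
    dsimp only
    split <;> omega

theorem bWordEnd_ub (t : List Char) (s : Nat) (h : s ≤ t.length) : bWordEnd t s ≤ t.length := by
  rw [bWordEnd]
  cases hf : (List.range' s (t.length - s)).find? (bBreak t) with
  | none => simp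
  | some b =>
    have hm := List.mem_of_find?_eq_some hf
    rw [List.mem_range'_1] at hm
    dsimp only
    split <;> omega

theorem bChunkEnd_bounds (t : List Char) (i : Nat) (h : i < t.length) :
    i < bChunkEnd t i ∧ bChunkEnd t i ≤ t.length := by
  rw [bChunkEnd]
  by_cases hws : bIsWs (bAt t i) = true
  · rw [if_pos hws]
    exact ⟨bRunEnd_gt t bIsWs i h hws, bRunEnd_le t bIsWs i (le_of_lt h)⟩
  · rw [if_neg hws, bEmDash]
    have hwe1 : i < bWordEnd t (i + 1) :=
      lt_of_lt_of_le (Nat.lt_succ_self i) (bWordEnd_lb t (i + 1) (by omega))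
    have hwe2 : bWordEnd t (i + 1) ≤ t.length := bWordEnd_ub t (i + 1) (by omega)
    split
    · dsimp only
      split
      · rename_i hcond
        simp only [Bool.and_eq_true, ble_eq, blt_eq, decide_eq_true_eq] at hcond
        simp only [Option.getD_some]
        omega
      · simp only [Option.getD_none]
        exact ⟨hwe1, hwe2⟩
    · simp only [Option.getD_none]
      exact ⟨hwe1, hwe2⟩

theorem bChunksFrom_eq (t : List Char) : ∀ fuel i, i ≤ t.length → t.length - i < fuel →
    twSplitChunks t i fuel = bChunksFrom t i fuel := by
  intro fuel
  induction fuel with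
  | zero => intro i h hd; omega
  | succ fuel ih =>
    intro i h hd
    by_cases hi : i < t.length
    · obtain ⟨hgt, hle⟩ := bChunkEnd_bounds t i hi
      have hfm : twFindMatch t i = some (i, bChunkEnd t i) := by
        rw [twFindMatch, dif_pos hi, bChunkEnd_eq t i hi]
      rw [twSplitChunks, bChunksFrom, if_pos hi, if_pos hi, hfm]
      dsimp only
      rw [ih (bChunkEnd t i) hle (by omega)]
      simp
    · rw [twSplitChunks, bChunksFrom, if_neg hi, if_neg hi]

theorem bLineLen_nil : bLineLen [] = 0 := rfl

theorem bLineLen_cons (c : List Char) (l : List (List Char)) :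
    bLineLen (c :: l) = (c.length : Int) + bLineLen l := by
  simp [bLineLen]

theorem bFitCount_greedy (width : Int) (chunks : List (List Char)) :
    ∀ cur len, twGreedy chunks cur len width =
      (cur ++ chunks.take (bFitCount width len chunks),
       len + bLineLen (chunks.take (bFitCount width len chunks)),
       chunks.drop (bFitCount width len chunks)) := by
  induction chunks with
  | nil => intro cur len; simp [twGreedy, bFitCount, bLineLen]
  | cons c rest ih =>
    intro cur len
    rw [twGreedy, bFitCount]
    by_cases hfit : len + (c.length : Int) ≤ width
    · rw [if_pos hfit, if_pos hfit, ih]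
      simp [List.take_succ_cons, bLineLen_cons, add_assoc]
    · rw [if_neg hfit, if_neg hfit]
      simp [bLineLen_nil]

theorem myFoldlCongr {α β : Type} (l : List α) (f g : β → α → β) (init : β)
    (h : ∀ acc, ∀ x ∈ l, f acc x = g acc x) : l.foldl f init = l.foldl g init := by
  induction l generalizing init with
  | nil => rfl
  | cons a l ih =>
    simp only [List.foldl_cons]
    rw [h init a (List.mem_cons_self ..)]
    exact ih _ (fun acc x hx => h acc x (List.mem_cons_of_mem a hx))

theorem bLastDash_eq (l : List Char) : bLastDash l = twRfindDash l := by
  induction l using List.reverseRecOn with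
  | nil => rfl
  | append_singleton xs x ih =>
    rw [bLastDash]
    simp only [bAt_eq]
    rw [List.length_append]
    simp only [List.length_cons, List.length_nil, Nat.zero_add]
    rw [List.range_succ, List.foldl_append]
    have hcongr : (List.range xs.length).foldl
        (fun acc k => if (xs ++ [x]).getD k ' ' = '-' then (k : Int) else acc) (-1)
        = bLastDash xs := by
      rw [bLastDash]
      simp only [bAt_eq]
      exact myFoldlCongr _ _ _ _ (fun acc k hk => by
        rw [List.getD_append _ _ _ _ (by simpa using List.mem_range.mp hk)])
    rw [hcongr]
    have hx : (xs ++ [x]).getD xs.length ' ' = x := by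
      simp [List.getD]
    rw [List.foldl_cons, List.foldl_nil, hx]
    rw [twRfindDash, List.reverse_append, List.reverse_singleton, List.singleton_append,
      List.findIdx?_cons]
    by_cases hxd : x = '-'
    · simp [hxd]
    · rw [if_neg hxd, if_neg (by simp [hxd])]
      cases hf : xs.reverse.findIdx? (· == '-') with
      | none =>
        rw [ih, twRfindDash, hf]
        simp
      | some k =>
        simp only [Option.map_some]
        rw [ih, twRfindDash, hf]
        simp only [List.length_append, List.length_cons, List.length_nil]
        push_cast
        ring

theorem anyNe_eq (l : List Char) :
    (l.any (· != '-')) = !(l.all (· == '-')) := by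
  induction l with
  | nil => rfl
  | cons c r ih =>
    simp only [List.any_cons, List.all_cons, bne] at ih ⊢
    rw [ih]
    cases c == '-' <;> simp

theorem bLongWord_eq (chunk : List Char) (curLen width : Int) :
    bLongWord chunk curLen width = twHandleLongWord chunk curLen width := by
  rw [bLongWord, twHandleLongWord]
  simp only [bLastDash_eq, anyNe_eq]

theorem dropTrail_eq (l : List (List Char)) :
    (match l.reverse with
      | last :: front => if (PySem.Chars.strip last).isEmpty then front.reverse else l
      | [] => l) =
    (match l.getLast? with
      | some last => if (PySem.Chars.strip last).isEmpty then l.dropLast else l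
      | none => l) := by
  induction l using List.reverseRecOn with
  | nil => rfl
  | append_singleton xs x _ =>
    rw [List.reverse_append, List.reverse_singleton, List.singleton_append]
    simp

theorem bWrap_eq (width : Int) : ∀ (fuel : Nat) (chunks acc : List (List Char)),
    twWrapChunks chunks width fuel acc = acc ++ bWrap width chunks fuel (!acc.isEmpty) := by
  intro fuel
  induction fuel with
  | zero =>
    intro chunks acc
    rw [twWrapChunks]
    cases chunks <;> simp [bWrap]
  | succ fuel ih =>
    intro chunks acc
    have emit : ∀ (acc L D' : List (List Char)),
        twWrapChunks D' width fuel (if L.isEmpty then acc else acc ++ [L.flatten])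
          = acc ++ (if L.isEmpty then bWrap width D' fuel (!acc.isEmpty)
              else L.flatten :: bWrap width D' fuel true) := by
      intro acc L D'
      by_cases hL : L.isEmpty
      · rw [if_pos hL, if_pos hL, ih]
      · rw [if_neg hL, if_neg hL, ih]
        have hne : (acc ++ [L.flatten]).isEmpty = false := by simp
        rw [hne]
        simp
    cases chunks with
    | nil => rw [twWrapChunks]; simp [bWrap]
    | cons c rest =>
      rw [twWrapChunks, bWrap]
      dsimp only
      rw [bFitCount_greedy width _ [] 0]
      dsimp only
      delta bBlank
      simp only [List.nil_append, zero_add, bLongWord_eq, dropTrail_eq]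
      generalize (if ((PySem.Chars.strip c).isEmpty && !acc.isEmpty) = true then rest else c :: rest) = cs
      generalize bFitCount width 0 cs = k
      generalize cs.take k = T
      generalize cs.drop k = D
      cases D with
      | nil =>
        dsimp only
        exact emit acc _ _
      | cons h tl =>
        dsimp only
        exact emit acc _ _

theorem bMunge_munge (l : List Char) : bMunge l 0 = twMunge l := by
  rw [twMunge, bMunge_eq]

theorem bTextwrapWrap_eq (part : List Char) (width : Int) :
    bTextwrapWrap part width = pyTextwrapWrap part width := by
  rw [bTextwrapWrap, pyTextwrapWrap]
  rw [bMunge_munge, ← bChunksFrom_eq (twMunge part) ((twMunge part).length + 1) 0 (by omega) (by omega)]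
  rw [bWrap_eq]
  simp

-- ---- part 2: splitting on "\n\n" then "\n" equals splitting once on "\n" ----

-- clean recursive models of Python's split("\n") and split("\n\n")
def consHead (c : Char) : List (List Char) → List (List Char)
  | [] => [[c]]
  | x :: xs => (c :: x) :: xs

def consPre (p : List Char) : List (List Char) → List (List Char)
  | [] => [p]
  | x :: xs => (p ++ x) :: xs

def mySplit1 : List Char → List (List Char)
  | [] => [[]]
  | c :: r => if c = '\n' then [] :: mySplit1 r else consHead c (mySplit1 r)

def mySplit2 : List Char → List (List Char)
  | [] => [[]]
  | c :: r =>
    if c = '\n' ∧ r.head? = some '\n' then [] :: mySplit2 r.tail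
    else consHead c (mySplit2 r)
termination_by s => s.length
decreasing_by all_goals (simp_all; try omega)

-- head has no "\n\n" inside and does not end in '\n'
def seg : List Char → Bool
  | [] => true
  | ['\n'] => false
  | [_] => true
  | a :: b :: r => !(a == '\n' && b == '\n') && seg (b :: r)

-- greedy regrouping of the "\n"-split into the "\n\n"-split
def gMerge : List (List Char) → List (List Char)
  | [] => []
  | [x] => [x]
  | [x, []] => [x ++ ['\n']]
  | x :: [] :: rest => x :: gMerge rest
  | x :: y :: rest => gMerge ((x ++ '\n' :: y) :: rest)
termination_by l => l.length
decreasing_by all_goals simp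

theorem ic_one (sep x : List Char) : List.intercalate sep [x] = x := by
  simp [List.intercalate, List.intersperse]

theorem ic_cons2 (sep x y : List Char) (L : List (List Char)) :
    List.intercalate sep (x :: y :: L) = x ++ sep ++ List.intercalate sep (y :: L) := by
  simp [List.intercalate, List.intersperse]

theorem mySplit1_ne_nil (s : List Char) : mySplit1 s ≠ [] := by
  induction s with
  | nil => simp [mySplit1]
  | cons c r ih =>
    simp only [mySplit1]
    split
    · simp
    · cases h : mySplit1 r with
      | nil => exact absurd h ih
      | cons x xs => simp [consHead]

theorem mySplit2_ne_nil (s : List Char) : mySplit2 s ≠ [] := by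
  induction s using mySplit2.induct with
  | case1 => simp [mySplit2]
  | case2 c r hc ih => simp [mySplit2, hc]
  | case3 c r hc ih =>
    simp only [mySplit2, if_neg hc]
    cases h : mySplit2 r with
    | nil => exact absurd h ih
    | cons x xs => simp [consHead]

theorem consPre_nil (M : List (List Char)) (h : M ≠ []) : consPre [] M = M := by
  cases M with
  | nil => exact absurd rfl h
  | cons x xs => simp [consPre]

theorem consPre_consHead (p : List Char) (c : Char) (M : List (List Char)) :
    consPre p (consHead c M) = consPre (p ++ [c]) M := by
  cases M <;> simp [consPre, consHead]

theorem go1_nil (k : Nat) (cur : List Char) (acc : List (List Char)) :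
    PySem.Chars.splitOn.go ['\n'] (k + 1) [] cur acc = (cur.reverse :: acc).reverse := by
  rw [PySem.Chars.splitOn.go.eq_def]

theorem go1_cut (k : Nat) (c : Char) (r cur : List Char) (acc : List (List Char)) (hc : c = '\n') :
    PySem.Chars.splitOn.go ['\n'] (k + 1) (c :: r) cur acc
      = PySem.Chars.splitOn.go ['\n'] k r [] (cur.reverse :: acc) := by
  rw [PySem.Chars.splitOn.go.eq_def]
  simp [List.isPrefixOf, hc]

theorem go1_step (k : Nat) (c : Char) (r cur : List Char) (acc : List (List Char)) (hc : ¬ c = '\n') :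
    PySem.Chars.splitOn.go ['\n'] (k + 1) (c :: r) cur acc
      = PySem.Chars.splitOn.go ['\n'] k r (c :: cur) acc := by
  rw [PySem.Chars.splitOn.go.eq_def]
  simp [List.isPrefixOf, Ne.symm hc]

theorem go2_nil (k : Nat) (cur : List Char) (acc : List (List Char)) :
    PySem.Chars.splitOn.go ['\n', '\n'] (k + 1) [] cur acc = (cur.reverse :: acc).reverse := by
  rw [PySem.Chars.splitOn.go.eq_def]

theorem go2_cut (k : Nat) (c c2 : Char) (r2 cur : List Char) (acc : List (List Char))
    (hc : c = '\n') (h2 : c2 = '\n') :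
    PySem.Chars.splitOn.go ['\n', '\n'] (k + 1) (c :: c2 :: r2) cur acc
      = PySem.Chars.splitOn.go ['\n', '\n'] k r2 [] (cur.reverse :: acc) := by
  rw [PySem.Chars.splitOn.go.eq_def]
  simp [List.isPrefixOf, hc, h2]

theorem go2_step (k : Nat) (c : Char) (r cur : List Char) (acc : List (List Char))
    (hc : ¬ (c = '\n' ∧ r.head? = some '\n')) :
    PySem.Chars.splitOn.go ['\n', '\n'] (k + 1) (c :: r) cur acc
      = PySem.Chars.splitOn.go ['\n', '\n'] k r (c :: cur) acc := by
  rw [PySem.Chars.splitOn.go.eq_def]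
  have : (['\n', '\n'].isPrefixOf (c :: r)) = false := by
    cases r with
    | nil => simp [List.isPrefixOf]
    | cons d r2 =>
      simp [List.isPrefixOf]
      intro h1 h2
      exact hc ⟨h1.symm, by simp [h2.symm]⟩
  simp [this]

theorem splitOn_go1 (l : List Char) : ∀ (fuel : Nat) (cur : List Char) (acc : List (List Char)),
    l.length < fuel →
    PySem.Chars.splitOn.go ['\n'] fuel l cur acc = acc.reverse ++ consPre cur.reverse (mySplit1 l) := by
  induction l with
  | nil =>
    intro fuel cur acc h
    cases fuel with
    | zero => omega
    | succ k =>
      rw [go1_nil]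
      simp [mySplit1, consPre]
  | cons c r ih =>
    intro fuel cur acc h
    cases fuel with
    | zero => simp at h
    | succ k =>
      by_cases hc : c = '\n'
      · rw [go1_cut k c r cur acc hc]
        rw [ih k [] (cur.reverse :: acc) (by simp at h; omega)]
        simp only [mySplit1, if_pos hc, List.reverse_cons, List.reverse_nil]
        rw [consPre_nil _ (mySplit1_ne_nil r)]
        cases hm : mySplit1 r with
        | nil => exact absurd hm (mySplit1_ne_nil r)
        | cons x xs => simp [consPre]
      · rw [go1_step k c r cur acc hc]
        rw [ih k (c :: cur) acc (by simp at h ⊢; omega)]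
        simp only [mySplit1, if_neg hc, List.reverse_cons]
        rw [consPre_consHead]

theorem splitOn_eq_mySplit1 (s : List Char) : PySem.Chars.splitOn s ['\n'] = mySplit1 s := by
  unfold PySem.Chars.splitOn
  rw [splitOn_go1 s (s.length + 1) [] [] (by omega)]
  simp only [List.reverse_nil, List.nil_append]
  exact consPre_nil _ (mySplit1_ne_nil s)

theorem splitOn_go2 (l : List Char) : ∀ (fuel : Nat) (cur : List Char) (acc : List (List Char)),
    l.length < fuel →
    PySem.Chars.splitOn.go ['\n', '\n'] fuel l cur acc = acc.reverse ++ consPre cur.reverse (mySplit2 l) := by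
  induction l using mySplit2.induct with
  | case1 =>
    intro fuel cur acc h
    cases fuel with
    | zero => omega
    | succ k =>
      rw [go2_nil]
      simp [mySplit2, consPre]
  | case2 c r hc ih =>
    intro fuel cur acc h
    cases fuel with
    | zero => simp at h
    | succ k =>
      obtain ⟨hc1, hc2⟩ := hc
      cases r with
      | nil => simp at hc2
      | cons d r2 =>
        simp only [List.head?_cons, Option.some.injEq] at hc2
        rw [go2_cut k c d r2 cur acc hc1 hc2]
        simp only [List.tail_cons] at ih
        rw [ih k [] (cur.reverse :: acc) (by simp at h ⊢; omega)]
        simp only [List.reverse_nil]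
        rw [consPre_nil _ (mySplit2_ne_nil r2)]
        have hsp : mySplit2 (c :: d :: r2) = [] :: mySplit2 r2 := by
          rw [mySplit2]
          rw [if_pos ⟨hc1, by simp [hc2]⟩]
          simp
        rw [hsp]
        cases hm : mySplit2 r2 with
        | nil => exact absurd hm (mySplit2_ne_nil r2)
        | cons x xs => simp [consPre]
  | case3 c r hc ih =>
    intro fuel cur acc h
    cases fuel with
    | zero => simp at h
    | succ k =>
      rw [go2_step k c r cur acc hc]
      rw [ih k (c :: cur) acc (by simp at h ⊢; omega)]
      simp only [mySplit2, if_neg hc, List.reverse_cons]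
      rw [consPre_consHead]

theorem splitOn_eq_mySplit2 (s : List Char) : PySem.Chars.splitOn s ['\n', '\n'] = mySplit2 s := by
  unfold PySem.Chars.splitOn
  rw [splitOn_go2 s (s.length + 1) [] [] (by omega)]
  simp only [List.reverse_nil, List.nil_append]
  exact consPre_nil _ (mySplit2_ne_nil s)

theorem mem_mySplit1_nlFree (s : List Char) : ∀ z ∈ mySplit1 s, '\n' ∉ z := by
  induction s with
  | nil => simp [mySplit1]
  | cons c r ih =>
    simp only [mySplit1]
    split
    · intro z hz
      rcases List.mem_cons.mp hz with hz | hz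
      · simp [hz]
      · exact ih z hz
    · rename_i hc
      cases h : mySplit1 r with
      | nil => exact absurd h (mySplit1_ne_nil r)
      | cons x xs =>
        intro z hz
        rcases List.mem_cons.mp hz with hz | hz
        · subst hz
          intro hmem
          rcases List.mem_cons.mp hmem with hmem | hmem
          · exact hc hmem.symm
          · exact ih x (h ▸ List.mem_cons_self ..) hmem
        · exact ih z (h ▸ List.mem_cons_of_mem x hz)

theorem join1_mySplit1 (s : List Char) : List.intercalate ['\n'] (mySplit1 s) = s := by
  induction s with
  | nil => simp [mySplit1, List.intercalate]
  | cons c r ih =>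
    simp only [mySplit1]
    split
    · rename_i hc
      subst hc
      cases h : mySplit1 r with
      | nil => exact absurd h (mySplit1_ne_nil r)
      | cons x xs =>
        rw [ic_cons2]
        simp only [List.nil_append]
        rw [← h, ih]
        simp
    · cases h : mySplit1 r with
      | nil => exact absurd h (mySplit1_ne_nil r)
      | cons x xs =>
        simp only [consHead]
        rw [h] at ih
        cases xs with
        | nil => rw [ic_one] at ih ⊢; simp [ih]
        | cons y ys =>
          rw [ic_cons2] at ih ⊢
          simpa using congrArg (c :: ·) ih

theorem mySplit1_nlFree (s : List Char) (h : '\n' ∉ s) : mySplit1 s = [s] := by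
  induction s with
  | nil => simp [mySplit1]
  | cons c r ih =>
    simp only [mySplit1]
    rw [if_neg (by intro hc; exact h (hc ▸ List.mem_cons_self ..))]
    rw [ih (fun hm => h (List.mem_cons_of_mem c hm))]
    simp [consHead]

theorem mySplit1_append (x y : List Char) : mySplit1 (x ++ '\n' :: y) = mySplit1 x ++ mySplit1 y := by
  induction x with
  | nil => simp [mySplit1]
  | cons c r ih =>
    simp only [List.cons_append, mySplit1, ih]
    split
    · simp
    · cases h : mySplit1 r with
      | nil => exact absurd h (mySplit1_ne_nil r)
      | cons a as => simp [consHead]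

theorem seg_single (c : Char) (h : c ≠ '\n') : seg [c] = true := by
  simp [seg]

theorem seg_single_ne (c : Char) (h : seg [c] = true) : c ≠ '\n' := by
  intro hc
  subst hc
  simp [seg] at h

theorem seg_cons2 (a b : Char) (r : List Char) :
    seg (a :: b :: r) = (!(a == '\n' && b == '\n') && seg (b :: r)) := by
  simp [seg]

theorem consHead_eq_consPre (c : Char) (M : List (List Char)) :
    consHead c M = consPre [c] M := by
  cases M <;> simp [consHead, consPre]

theorem consHead_consPre (c : Char) (p : List Char) (M : List (List Char)) :
    consHead c (consPre p M) = consPre (c :: p) M := by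
  cases M <;> simp [consHead, consPre]

theorem ic_append_ne (sep : List Char) (A B : List (List Char)) (hA : A ≠ []) (hB : B ≠ []) :
    List.intercalate sep (A ++ B) = List.intercalate sep A ++ sep ++ List.intercalate sep B := by
  induction A with
  | nil => exact absurd rfl hA
  | cons a as ih =>
    cases as with
    | nil =>
      cases B with
      | nil => exact absurd rfl hB
      | cons b bs => simp [ic_cons2, ic_one]
    | cons a2 as2 =>
      have ih' := ih (by simp)
      simp only [List.cons_append] at ih' ⊢
      rw [ic_cons2, ih', ic_cons2]
      simp

theorem ic_glue (a b : List Char) (M : List (List Char)) :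
    List.intercalate ['\n'] ((a ++ '\n' :: b) :: M) = a ++ '\n' :: List.intercalate ['\n'] (b :: M) := by
  cases M with
  | nil => rw [ic_one, ic_one]
  | cons m ms =>
    rw [ic_cons2, ic_cons2]
    simp

theorem seg_of_nlFree (s : List Char) (h : '\n' ∉ s) : seg s = true := by
  induction s with
  | nil => rfl
  | cons c r ih =>
    have hc : c ≠ '\n' := fun hc => h (hc ▸ List.mem_cons_self ..)
    have hr : '\n' ∉ r := fun hm => h (List.mem_cons_of_mem c hm)
    cases r with
    | nil => exact seg_single c hc
    | cons b t =>
      rw [seg_cons2]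
      simp only [Bool.and_eq_true, Bool.not_eq_eq_eq_not, Bool.not_true]
      constructor
      · simp [hc]
      · exact ih hr

theorem seg_merge (x y : List Char) (hx : seg x = true) (hy : '\n' ∉ y) (hy2 : y ≠ []) :
    seg (x ++ '\n' :: y) = true := by
  induction x with
  | nil =>
    cases y with
    | nil => exact absurd rfl hy2
    | cons y0 yr =>
      simp only [List.nil_append]
      rw [seg_cons2]
      have hy0 : y0 ≠ '\n' := fun hc => hy (hc ▸ List.mem_cons_self ..)
      simp only [Bool.and_eq_true]
      exact ⟨by simp [hy0], seg_of_nlFree _ hy⟩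
  | cons c x' ih =>
    cases x' with
    | nil =>
      have hc : c ≠ '\n' := seg_single_ne c hx
      simp only [List.cons_append, List.nil_append]
      rw [seg_cons2]
      simp only [Bool.and_eq_true]
      refine ⟨by simp [hc], ?_⟩
      have := ih (by rfl)
      simpa using this
    | cons b t =>
      rw [seg_cons2] at hx
      obtain ⟨h1, h2⟩ := Bool.and_eq_true ..|>.mp hx
      simp only [List.cons_append]
      rw [seg_cons2]
      simp only [Bool.and_eq_true]
      exact ⟨by simpa using h1, by simpa using ih h2⟩

-- B0: within one "\n\n"-free segment, split("\n\n") is the identity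
theorem mySplit2_seg (x : List Char) (hx : seg x = true) : mySplit2 x = [x] := by
  induction x with
  | nil => simp [mySplit2]
  | cons c r ih =>
    cases r with
    | nil =>
      rw [mySplit2, if_neg (by simp)]
      simp [mySplit2, consHead]
    | cons b t =>
      rw [seg_cons2] at hx
      obtain ⟨h1, h2⟩ := Bool.and_eq_true ..|>.mp hx
      rw [mySplit2, if_neg (by
        simp only [List.head?_cons, Option.some.injEq, not_and]
        intro hc hb
        rw [hc, hb] at h1
        simp at h1)]
      rw [ih h2]
      simp [consHead]

-- B1: a real "\n\n" separator after a clean segment cuts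
theorem mySplit2_cut (x : List Char) (r : List Char) (hx : seg x = true) :
    mySplit2 (x ++ '\n' :: '\n' :: r) = x :: mySplit2 r := by
  induction x with
  | nil =>
    simp only [List.nil_append]
    rw [mySplit2, if_pos (by simp)]
    rfl
  | cons c x' ih =>
    simp only [List.cons_append]
    cases x' with
    | nil =>
      have hc : c ≠ '\n' := seg_single_ne c hx
      rw [mySplit2, if_neg (by simp [hc])]
      simp only [List.nil_append] at ih ⊢
      rw [ih rfl]
      rfl
    | cons b t =>
      rw [seg_cons2] at hx
      obtain ⟨h1, h2⟩ := Bool.and_eq_true ..|>.mp hx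
      rw [mySplit2, if_neg (by
        simp only [List.cons_append, List.head?_cons, Option.some.injEq, not_and]
        intro hc hb
        rw [hc, hb] at h1
        simp at h1)]
      rw [ih h2]
      rfl

-- B2: a single '\n' not followed by '\n' is absorbed into the first fragment
theorem mySplit2_abs (x : List Char) (r : List Char) (hx : seg x = true)
    (hr : r.head? ≠ some '\n') : mySplit2 (x ++ '\n' :: r) = consPre (x ++ ['\n']) (mySplit2 r) := by
  induction x with
  | nil =>
    simp only [List.nil_append]
    rw [mySplit2, if_neg (by simp_all)]
    exact consHead_eq_consPre '\n' (mySplit2 r)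
  | cons c x' ih =>
    simp only [List.cons_append]
    cases x' with
    | nil =>
      have hc : c ≠ '\n' := seg_single_ne c hx
      rw [mySplit2, if_neg (by simp [hc])]
      simp only [List.nil_append] at ih ⊢
      rw [ih rfl, consHead_consPre]
    | cons b t =>
      rw [seg_cons2] at hx
      obtain ⟨h1, h2⟩ := Bool.and_eq_true ..|>.mp hx
      rw [mySplit2, if_neg (by
        simp only [List.cons_append, List.head?_cons, Option.some.injEq, not_and]
        intro hc hb
        rw [hc, hb] at h1
        simp at h1)]
      rw [ih h2, consHead_consPre]

theorem gMerge_ne_nil (L : List (List Char)) (h : L ≠ []) : gMerge L ≠ [] := by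
  induction L using gMerge.induct with
  | case1 => exact absurd rfl h
  | case2 x => simp [gMerge]
  | case3 x => simp [gMerge]
  | case4 x rest hr ih => simp [gMerge]
  | case5 x y rest h1 h2 ih =>
    rw [gMerge.eq_def]
    cases y with
    | nil => exact absurd rfl (fun hh => h2 hh)
    | cons y0 ys =>
      cases rest <;> simpa using ih (by simp)

theorem intercalate_cons_ne (sep : List Char) (x : List Char) (L : List (List Char)) (h : L ≠ []) :
    List.intercalate sep (x :: L) = x ++ sep ++ List.intercalate sep L := by
  cases L with
  | nil => exact absurd rfl h
  | cons y ys => exact ic_cons2 sep x y ys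

theorem gMerge_merge (x : List Char) (y0 : Char) (ys : List Char) (rest : List (List Char)) :
    gMerge (x :: (y0 :: ys) :: rest) = gMerge ((x ++ '\n' :: y0 :: ys) :: rest) := by
  rw [gMerge.eq_def]

theorem gMerge_cut (x r0 : List Char) (rs : List (List Char)) :
    gMerge (x :: [] :: r0 :: rs) = x :: gMerge (r0 :: rs) := by
  rw [gMerge.eq_def]

theorem mySplit2_join (L : List (List Char)) (h : L ≠ [])
    (hh : seg L.headI = true) (ht : ∀ z ∈ L.tail, '\n' ∉ z) :
    mySplit2 (List.intercalate ['\n'] L) = gMerge L := by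
  induction L using gMerge.induct with
  | case1 => exact absurd rfl h
  | case2 x =>
    rw [ic_one, gMerge]
    exact mySplit2_seg x (by simpa using hh)
  | case3 x =>
    rw [ic_cons2, ic_one, gMerge]
    have : x ++ ['\n'] ++ [] = x ++ '\n' :: [] := by simp
    rw [this]
    rw [mySplit2_abs x [] (by simpa using hh) (by simp)]
    simp [mySplit2, consPre]
  | case4 x rest hr ih =>
    have hrest : rest ≠ [] := fun hh2 => hr hh2
    rw [ic_cons2, intercalate_cons_ne ['\n'] [] rest hrest]
    have : x ++ ['\n'] ++ ([] ++ ['\n'] ++ List.intercalate ['\n'] rest)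
        = x ++ '\n' :: '\n' :: List.intercalate ['\n'] rest := by simp
    rw [this, mySplit2_cut x _ (by simpa using hh)]
    have hseg : seg rest.headI = true := by
      cases rest with
      | nil => exact absurd rfl hrest
      | cons r0 rs =>
        exact seg_of_nlFree r0 (ht r0 (by simp))
    rw [ih hrest hseg (fun z hz => ht z (List.mem_cons_of_mem [] (by
      cases rest with
      | nil => exact absurd rfl hrest
      | cons r0 rs => exact List.mem_cons_of_mem r0 hz)))]
    cases rest with
    | nil => exact absurd rfl hrest
    | cons r0 rs => exact (gMerge_cut x r0 rs).symm
  | case5 x y rest h1 h2 ih =>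
    have hy : y ≠ [] := fun hh2 => h2 hh2
    cases y with
    | nil => exact absurd rfl hy
    | cons y0 ys =>
      have hynl : '\n' ∉ y0 :: ys := ht (y0 :: ys) (by simp)
      have hx : seg x = true := by simpa using hh
      have hstr : List.intercalate ['\n'] (x :: (y0 :: ys) :: rest)
          = List.intercalate ['\n'] ((x ++ '\n' :: y0 :: ys) :: rest) := by
        rw [ic_cons2, ic_glue]
        simp
      rw [hstr]
      rw [ih (by simp) (by simpa using seg_merge x (y0 :: ys) hx hynl (by simp))
        (fun z hz => ht z (by simpa using List.mem_cons_of_mem (y0 :: ys) hz))]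
      exact (gMerge_merge x y0 ys rest).symm

-- the f of the proofs: what A computes for one paragraph
def fPar (ll : Int) (p : List Char) : List Char :=
  List.intercalate ['\n'] ((mySplit1 p).map
    (fun part => List.intercalate ['\n'] (pyTextwrapWrap part ll)))

theorem wrap_nil (ll : Int) : pyTextwrapWrap [] ll = [] := by
  rfl

theorem fPar_nil (ll : Int) : fPar ll [] = [] := by
  unfold fPar
  rw [show mySplit1 [] = [[]] from rfl]
  simp only [List.map_cons, List.map_nil, ic_one]
  rw [wrap_nil]
  rfl

theorem fPar_append (ll : Int) (x y : List Char) :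
    fPar ll (x ++ '\n' :: y) = fPar ll x ++ '\n' :: fPar ll y := by
  unfold fPar
  rw [mySplit1_append, List.map_append,
    ic_append_ne ['\n'] _ _ (by simp [mySplit1_ne_nil]) (by simp [mySplit1_ne_nil])]
  simp

-- the flattening identity: joining the regrouped paragraphs with "\n\n" equals joining all lines with "\n"
theorem gMerge_join (ll : Int) (L : List (List Char)) (h : L ≠ []) :
    List.intercalate ['\n', '\n'] ((gMerge L).map (fPar ll)) =
    List.intercalate ['\n'] (L.map (fPar ll)) := by
  induction L using gMerge.induct with
  | case1 => exact absurd rfl h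
  | case2 x => rw [gMerge]; simp only [List.map_cons, List.map_nil, ic_one]
  | case3 x =>
    rw [gMerge]
    simp only [List.map_cons, List.map_nil, ic_one, ic_cons2]
    have : x ++ ['\n'] = x ++ '\n' :: [] := by simp
    rw [this, fPar_append, fPar_nil]
    simp
  | case4 x rest hr ih =>
    have hrest : rest ≠ [] := fun hh2 => hr hh2
    cases rest with
    | nil => exact absurd rfl hrest
    | cons r0 rs =>
      have hmr : (gMerge (r0 :: rs)).map (fPar ll) ≠ [] := by
        simpa using gMerge_ne_nil (r0 :: rs) (by simp)
      rw [gMerge_cut, List.map_cons, intercalate_cons_ne _ _ _ hmr, ih (by simp)]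
      simp only [List.map_cons, ic_cons2, fPar_nil]
      simp
  | case5 x y rest h1 h2 ih =>
    have hy : y ≠ [] := fun hh2 => h2 hh2
    cases y with
    | nil => exact absurd rfl hy
    | cons y0 ys =>
      rw [gMerge_merge, ih (by simp)]
      rw [List.map_cons, fPar_append, ic_glue]
      rw [List.map_cons, List.map_cons, ic_cons2]
      simp

theorem fPar_nlFree (ll : Int) (z : List Char) (h : '\n' ∉ z) :
    fPar ll z = List.intercalate ['\n'] (pyTextwrapWrap z ll) := by
  unfold fPar
  rw [mySplit1_nlFree z h]
  simp only [List.map_cons, List.map_nil, ic_one]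

theorem headI_seg (m : List Char) : seg (mySplit1 m).headI = true := by
  cases hm : mySplit1 m with
  | nil => exact absurd hm (mySplit1_ne_nil m)
  | cons x xs =>
    exact seg_of_nlFree x (mem_mySplit1_nlFree m x (hm ▸ List.mem_cons_self ..))

theorem mySplit2_eq_gMerge (m : List Char) : mySplit2 m = gMerge (mySplit1 m) := by
  conv_lhs => rw [← join1_mySplit1 m]
  exact mySplit2_join _ (mySplit1_ne_nil m) (headI_seg m)
    (fun z hz => mem_mySplit1_nlFree m z (List.mem_of_mem_tail hz))

-- ===== VERDICT (by name: the statement is the Claim_ definition above) =====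
theorem wrap_message_spec : Claim_equal_wrap_message := by
  intro message ll _ _
  unfold Spec_wrap_message wrap_message wrap_message_alt
  simp only [PySem.List.foldl_append_singleton_eq_map, List.nil_append, List.map_map,
    Function.comp_def, PySem.Chars.join, splitOn_eq_mySplit1, splitOn_eq_mySplit2,
    bTextwrapWrap_eq]
  have hF : ∀ p : List Char,
      List.intercalate ['\n'] ((mySplit1 p).map
        (fun line => List.intercalate ['\n'] ((mySplit1 line).map
          (fun part => List.intercalate ['\n'] (pyTextwrapWrap part ll))))) = fPar ll p := by
    intro p
    unfold fPar
    refine congrArg _ (List.map_congr_left ?_)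
    intro z hz
    have hnl := mem_mySplit1_nlFree p z hz
    show List.intercalate ['\n'] ((mySplit1 z).map
        (fun part => List.intercalate ['\n'] (pyTextwrapWrap part ll)))
      = List.intercalate ['\n'] (pyTextwrapWrap z ll)
    rw [mySplit1_nlFree z hnl]
    simp only [List.map_cons, List.map_nil, ic_one]
  have hA : (mySplit2 message.toList).map
      (fun p => List.intercalate ['\n'] ((mySplit1 p).map
        (fun line => List.intercalate ['\n'] ((mySplit1 line).map
          (fun part => List.intercalate ['\n'] (pyTextwrapWrap part ll)))))) =
      (mySplit2 message.toList).map (fPar ll) :=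
    List.map_congr_left (fun p _ => hF p)
  have hB : (mySplit1 message.toList).map
      (fun line => List.intercalate ['\n'] (pyTextwrapWrap line ll)) =
      (mySplit1 message.toList).map (fPar ll) :=
    List.map_congr_left (fun z hz => (fPar_nlFree ll z (mem_mySplit1_nlFree _ z hz)).symm)
  rw [hA, hB, mySplit2_eq_gMerge, gMerge_join ll _ (mySplit1_ne_nil _)]
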